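-- pv_equiv track=rewrite | github.com/Greenhorntc/Text-Classification-in-Tibetan-Language-based-on-Prompt-Learning | WCMEvaluate.py | get_orlabel
-- ===== SOURCE A (Python) =====
-- def get_orlabel(labellist):
--     labels = list(reversed(labellist))
--     # 因为使用的后缀根据标签添加的，所以每条数据将会产生7条数据
--     # 每次取bathcsize条数据，就能得到原始标签
--     reallabels = []
--     temp = []
--     while len(labels) > 0:
--         label = labels.pop()
--         temp.append(label)
--         if len(temp) == 7:
--             index = temp.index(1)
--             temp.clear()
--             reallabels.append(index)
--     return reallabels
-- ===== SOURCE B (Python) =====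
-- def get_orlabel(labellist):
--     if len(labellist) < 7:
--         return []
--     return [labellist[:7].index(1)] + get_orlabel(labellist[7:])
-- ===== Notes on version B (the rewrite author's own statement) =====
-- stated objective: simpler
-- what changed: Replaces the reversed-list/pop/temp-buffer while loop with a direct recursion that takes the index of 1 in the first 7-element slice and recurses on the rest, naturally ignoring a trailing partial chunk.
import Mathlib
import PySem

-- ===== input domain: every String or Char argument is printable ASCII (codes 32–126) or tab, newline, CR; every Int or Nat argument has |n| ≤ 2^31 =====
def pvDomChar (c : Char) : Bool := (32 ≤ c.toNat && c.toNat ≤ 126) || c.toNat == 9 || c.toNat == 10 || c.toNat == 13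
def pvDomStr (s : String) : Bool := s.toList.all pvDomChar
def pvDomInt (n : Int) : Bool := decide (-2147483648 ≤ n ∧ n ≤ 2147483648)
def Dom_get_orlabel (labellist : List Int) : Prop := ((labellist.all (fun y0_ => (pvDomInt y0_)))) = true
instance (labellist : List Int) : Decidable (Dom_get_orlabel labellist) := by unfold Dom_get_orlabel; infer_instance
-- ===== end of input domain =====

-- B replaces A's reversed-list/pop/temp-buffer while loop by a direct recursion on 7-element slices; equivalence of return values is proved on Pre_ (every full 7-chunk contains a 1; elsewhere Python A raises ValueError).

-- ===== PORT A =====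
-- the while loop: pop from the end of `labels`, accumulate into `temp`, flush every 7 elements
def pvALoop (labels temp reallabels : List Int) : List Int :=
  if h : labels.length > 0 then
    match hp : PySem.List.pop? labels with
    | some (label, rest) =>
        let temp' := temp ++ [label]
        if temp'.length = 7 then
          match PySem.List.index? temp' 1 with
          | some idx => pvALoop rest [] (reallabels ++ [(idx : Int)])
          | none => reallabels      -- Python raises ValueError here; excluded by Pre_
        else pvALoop rest temp' reallabels
    | none => reallabels
  else reallabels
termination_by labels.length
decreasing_by all_goals (have := PySem.List.length_of_pop?_eq_some labels hp; dsimp only at this; omega)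

def get_orlabel (labellist : List Int) : List Int :=
  pvALoop labellist.reverse [] []

-- ===== PORT B =====
def get_orlabel_alt (labellist : List Int) : List Int :=
  if labellist.length < 7 then []
  else
    match PySem.List.index? (PySem.List.slice labellist none (some 7)) 1 with
    | some i => (i : Int) :: get_orlabel_alt (PySem.List.slice labellist (some 7) none)
    | none => []                   -- Python raises ValueError here; excluded by Pre_
termination_by labellist.length
decreasing_by simp only [PySem.List.slice_from labellist (by omega : (0:Int) ≤ 7), List.length_drop]; omega

-- ===== PRECONDITION & SPEC =====
-- Pre_ admits exactly the inputs on which Python A returns normally: every full 7-chunk contains a 1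
-- (on a chunk without a 1, `temp.index(1)` raises ValueError).
def Pre_get_orlabel (labellist : List Int) : Prop :=
  ∀ k < labellist.length / 7, (1 : Int) ∈ (labellist.drop (7 * k)).take 7
instance (labellist : List Int) : Decidable (Pre_get_orlabel labellist) := by
  unfold Pre_get_orlabel; infer_instance

def pvWitness_get_orlabel : List Int := [0, 1, 0, 0, 0, 0, 0, 0, 0, 1]

def Spec_get_orlabel (labellist : List Int) (out : List Int) : Prop := out = get_orlabel_alt labellist
instance (labellist : List Int) (out : List Int) : Decidable (Spec_get_orlabel labellist out) := by unfold Spec_get_orlabel; infer_instance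

-- ===== CLAIM (what is proved, stated in full; the proofs are below) =====
def Claim_equal_get_orlabel : Prop := ∀ (labellist : List Int), Dom_get_orlabel labellist → Pre_get_orlabel labellist → Spec_get_orlabel labellist (get_orlabel labellist)

-- ===== LEMMAS AND PROOFS =====

-- fewer than 7 elements left (counting the partial buffer): the loop drops them all and returns the accumulator
lemma pvALoop_small (xs : List Int) : ∀ (temp acc : List Int),
    temp.length + xs.length < 7 → pvALoop xs.reverse temp acc = acc := by
  induction xs with
  | nil => intro temp acc _; simp [pvALoop]
  | cons x xs ih =>
    intro temp acc h
    rw [List.reverse_cons, pvALoop]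
    have hlen : (xs.reverse ++ [x]).length > 0 := by simp
    rw [dif_pos hlen]
    rw [PySem.List.pop?_last xs.reverse x]
    simp only
    have hne : ¬ ((temp ++ [x]).length = 7) := by simp at h ⊢; omega
    rw [if_neg hne]
    exact ih (temp ++ [x]) acc (by simp at h ⊢; omega)

-- processing one full chunk c (with the buffer already holding `temp`)
lemma pvALoop_chunk (c : List Int) : ∀ (temp xs acc : List Int),
    temp.length + c.length = 7 → c ≠ [] →
    pvALoop (c ++ xs).reverse temp acc =
      match PySem.List.index? (temp ++ c) 1 with
      | some i => pvALoop xs.reverse [] (acc ++ [(i : Int)])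
      | none => acc := by
  induction c with
  | nil => intro _ _ _ _ hne; exact absurd rfl hne
  | cons a c ih =>
    intro temp xs acc hlen _
    have : ((a :: c) ++ xs).reverse = (c ++ xs).reverse ++ [a] := by simp
    rw [this, pvALoop]
    have hpos : ((c ++ xs).reverse ++ [a]).length > 0 := by simp
    rw [dif_pos hpos, PySem.List.pop?_last (c ++ xs).reverse a]
    simp only
    by_cases hc : c = []
    · subst hc
      have h7 : (temp ++ [a]).length = 7 := by simp at hlen ⊢; omega
      rw [if_pos h7]
      simp
    · have hne7 : ¬ ((temp ++ [a]).length = 7) := by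
        have : 0 < c.length := List.length_pos_iff.mpr hc
        simp at hlen ⊢; omega
      rw [if_neg hne7]
      rw [ih (temp ++ [a]) xs acc (by simp at hlen ⊢; omega) hc]
      simp

-- Pre_ restricts to the tail after removing one full chunk
lemma pre_drop {xs : List Int} (h7 : 7 ≤ xs.length) (hp : Pre_get_orlabel xs) :
    Pre_get_orlabel (xs.drop 7) := by
  intro k hk
  have hlen : (xs.drop 7).length = xs.length - 7 := by simp
  have hk' : k + 1 < xs.length / 7 := by rw [hlen] at hk; omega
  have := hp (k + 1) hk'
  rw [List.drop_drop]
  have heq : 7 + 7 * k = 7 * (k + 1) := by ring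
  rw [heq]
  exact hp (k + 1) hk'

-- the main loop invariant: on Pre_ inputs the loop appends exactly B's result
lemma pvALoop_main : ∀ (n : Nat) (xs acc : List Int), xs.length ≤ n → Pre_get_orlabel xs →
    pvALoop xs.reverse [] acc = acc ++ get_orlabel_alt xs := by
  intro n
  induction n with
  | zero =>
    intro xs acc hn _
    have : xs = [] := List.eq_nil_of_length_eq_zero (by omega)
    subst this
    simp [pvALoop, get_orlabel_alt]
  | succ n ih =>
    intro xs acc hn hpre
    by_cases hlt : xs.length < 7
    · rw [pvALoop_small xs [] acc (by simpa using hlt)]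
      rw [get_orlabel_alt, if_pos hlt]
      simp
    · push_neg at hlt
      have hsplit : xs.take 7 ++ xs.drop 7 = xs := List.take_append_drop 7 xs
      have htk : (xs.take 7).length = 7 := by simp; omega
      have hne : xs.take 7 ≠ [] := by
        intro h; rw [h] at htk; simp at htk
      have hchunk := pvALoop_chunk (xs.take 7) [] (xs.drop 7) acc (by simpa using htk) hne
      rw [hsplit] at hchunk
      have hmem : (1 : Int) ∈ xs.take 7 := by
        have := hpre 0 (by omega)
        simpa using this
      obtain ⟨i, hi⟩ := Option.isSome_iff_exists.mp
        ((PySem.List.index?_isSome_iff (xs.take 7) 1).mpr hmem)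
      rw [List.nil_append] at hchunk
      rw [hchunk, hi]
      dsimp only
      have hdroplen : (xs.drop 7).length ≤ n := by simp; omega
      rw [ih (xs.drop 7) (acc ++ [(i : Int)]) hdroplen (pre_drop hlt hpre)]
      conv_rhs => rw [get_orlabel_alt]
      rw [if_neg (by omega)]
      rw [PySem.List.slice_to xs (by omega : (0:Int) ≤ 7),
          PySem.List.slice_from xs (by omega : (0:Int) ≤ 7)]
      have h7 : (7 : Int).toNat = 7 := by decide
      rw [h7, hi]
      simp

-- ===== VERDICT (by name: the statement is the Claim_ definition above) =====
theorem get_orlabel_spec : Claim_equal_get_orlabel := by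
  intro xs _ hpre
  unfold Spec_get_orlabel get_orlabel
  rw [pvALoop_main xs.length xs [] le_rfl hpre]
  simp
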